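-- pv_equiv track=rewrite | github.com/miliar/Code_Jam_Webscraper | solutions_python/Problem_123/626.py | solve
-- ===== SOURCE A (Python) =====
-- def solve(A, others):
--     others = sorted(others)
--
--     ops = 0
--
--     for idx in range(len(others)):
--         ops_now = 0
--         while A <= others[idx]:
--             A += A - 1
--             ops += 1
--             ops_now += 1
--
--             if ops_now >= len(others) - idx:
--                 return ops
--
--         A += others[idx]
--
--     return ops
-- ===== SOURCE B (Python) =====
-- def solve(A, others):
--     xs = sorted(others)
--     n = len(xs)
--     ops = 0
--     for i, x in enumerate(xs):
--         if A <= x: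
--             if A <= 1:
--                 return ops + (n - i)
--             q = (x - 1) // (A - 1)
--             k = q.bit_length()
--             if k >= n - i:
--                 return ops + (n - i)
--             ops += k
--             A = (A - 1) * 2**k + 1
--         A += x
--     return ops
-- ===== Notes on version B (the rewrite author's own statement) =====
-- stated objective: faster
-- what changed: B replaces A's per-grow inner while loop (which doubles the mote one step at a time, counting ops_now against the remaining motes) by a closed-form count of the needed grows, k = ((x-1)//(A-1)).bit_length(), compared once against the remaining count and applied as A = (A-1)*2**k + 1.
import Mathlib
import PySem

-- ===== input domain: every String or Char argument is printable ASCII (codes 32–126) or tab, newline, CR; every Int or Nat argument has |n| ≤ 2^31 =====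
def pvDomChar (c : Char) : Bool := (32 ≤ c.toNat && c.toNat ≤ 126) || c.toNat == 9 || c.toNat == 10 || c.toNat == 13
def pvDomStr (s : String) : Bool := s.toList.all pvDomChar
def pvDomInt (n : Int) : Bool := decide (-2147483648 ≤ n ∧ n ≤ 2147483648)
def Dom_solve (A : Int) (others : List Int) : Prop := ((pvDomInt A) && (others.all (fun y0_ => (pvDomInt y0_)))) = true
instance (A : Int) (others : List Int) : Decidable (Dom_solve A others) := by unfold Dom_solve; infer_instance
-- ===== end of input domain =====

-- B replaces A's mote-by-mote grow loop by a closed-form count of grows (bit_length of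
-- (x-1)//(A-1)); objective: faster (no per-grow iteration), same value on every input.

-- ===== PORT A =====
-- the inner 'while' of A, with its ops_now counter and early return (Sum.inl = early return)
def innerA (A x ops opsNow r : Int) : Int ⊕ (Int × Int) :=
  if A ≤ x then
    if opsNow + 1 ≥ r then Sum.inl (ops + 1)
    else innerA (A + (A - 1)) x (ops + 1) (opsNow + 1) r
  else Sum.inr (A, ops)
termination_by (r - opsNow).toNat
decreasing_by simp only [not_le] at *; omega

-- A's 'for idx in range(len(others))' over the sorted list; r = len(others) - idx = 1 + rest.length
def loopA (A : Int) (xs : List Int) (ops : Int) : Int :=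
  match xs with
  | [] => ops
  | x :: rest =>
    match innerA A x ops 0 (1 + (rest.length : Int)) with
    | Sum.inl res => res
    | Sum.inr (A', ops') => loopA (A' + x) rest ops'

def solve (A : Int) (others : List Int) : Int :=
  loopA A (PySem.List.sorted others (fun v => v)) 0

-- ===== PORT B =====
def loopB (A : Int) (xs : List Int) (ops : Int) : Int :=
  match xs with
  | [] => ops
  | x :: rest =>
    if A ≤ x then
      if A ≤ 1 then ops + (1 + (rest.length : Int))
      else
        -- here 2 ≤ A ≤ x, so q ≥ 1 and k = q.bit_length()
        let q := PySem.Int.floordiv (x - 1) (A - 1)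
        let k := PySem.Int.bitLength q
        if (k : Int) ≥ 1 + (rest.length : Int) then ops + (1 + (rest.length : Int))
        else loopB ((A - 1) * 2 ^ k + 1 + x) rest (ops + (k : Int))
    else loopB (A + x) rest ops

def solve_alt (A : Int) (others : List Int) : Int :=
  loopB A (PySem.List.sorted others (fun v => v)) 0

-- ===== PRECONDITION & SPEC =====
def Spec_solve (A : Int) (others : List Int) (out : Int) : Prop := out = solve_alt A others
instance (A : Int) (others : List Int) (out : Int) : Decidable (Spec_solve A others out) := by unfold Spec_solve; infer_instance

-- ===== CLAIM (what is proved, stated in full; the proofs are below) =====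
def Claim_equal_solve : Prop := ∀ (A : Int) (others : List Int), Dom_solve A others → Spec_solve A others (solve A others)

-- ===== LEMMAS AND PROOFS =====

-- when A ≤ 1 the grow step never increases A past x, so the counter exit fires
theorem innerA_of_le_one (A x ops opsNow r : Int) (hA : A ≤ 1) (hx : A ≤ x)
    (hr : opsNow < r) : innerA A x ops opsNow r = Sum.inl (ops + (r - opsNow)) := by
  rw [innerA, if_pos hx]
  by_cases h : opsNow + 1 ≥ r
  · rw [if_pos h]; congr 1; omega
  · rw [if_neg h,
      innerA_of_le_one (A + (A - 1)) x (ops + 1) (opsNow + 1) r (by omega) (by omega) (by omega)]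
    congr 1; omega
termination_by (r - opsNow).toNat
decreasing_by omega

-- 1 ≤ (x-1)//(A-1) ↔ A ≤ x, for 2 ≤ A
theorem one_le_q (A x : Int) (hA : 2 ≤ A) :
    A ≤ x ↔ 1 ≤ PySem.Int.floordiv (x - 1) (A - 1) := by
  rw [PySem.Int.le_floordiv_iff_mul_le (by omega)]
  omega

-- halving: (x-1)//(2A-2) = ((x-1)//(A-1))//2 for 2 ≤ A
theorem q_halves (A x : Int) (hA : 2 ≤ A) :
    PySem.Int.floordiv (x - 1) (A + (A - 1) - 1)
      = PySem.Int.floordiv (PySem.Int.floordiv (x - 1) (A - 1)) 2 := by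
  have hb : (0:Int) < A - 1 := by omega
  have h1 : PySem.Int.floordiv (x - 1) (A - 1) * (A - 1) ≤ x - 1 ∧
      x - 1 < (PySem.Int.floordiv (x - 1) (A - 1) + 1) * (A - 1) :=
    (PySem.Int.floordiv_eq_iff_of_pos hb).1 rfl
  have h2 : PySem.Int.floordiv (PySem.Int.floordiv (x - 1) (A - 1)) 2 * 2 ≤
        PySem.Int.floordiv (x - 1) (A - 1) ∧
      PySem.Int.floordiv (x - 1) (A - 1) <
        (PySem.Int.floordiv (PySem.Int.floordiv (x - 1) (A - 1)) 2 + 1) * 2 :=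
    (PySem.Int.floordiv_eq_iff_of_pos (by omega)).1 rfl
  rw [PySem.Int.floordiv_eq_iff_of_pos (by omega)]
  constructor
  · nlinarith [h1.1, h2.1]
  · nlinarith [h1.2, h2.2]

-- closed form of A's inner loop for 2 ≤ A ≤ x
theorem innerA_char (x r : Int) (n : Nat) : ∀ (A ops opsNow : Int), 2 ≤ A → A ≤ x → opsNow < r →
    (PySem.Int.floordiv (x - 1) (A - 1)).toNat = n →
    innerA A x ops opsNow r =
      (if ((PySem.Int.bitLength (PySem.Int.floordiv (x - 1) (A - 1))) : Int) ≥ r - opsNow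
       then Sum.inl (ops + (r - opsNow))
       else Sum.inr ((A - 1) * 2 ^ (PySem.Int.bitLength (PySem.Int.floordiv (x - 1) (A - 1))) + 1,
                     ops + (PySem.Int.bitLength (PySem.Int.floordiv (x - 1) (A - 1))))) := by
  induction n using Nat.strong_induction_on with
  | _ n IH =>
    intro A ops opsNow hA hx hr hn
    have hb : (0:Int) < A - 1 := by omega
    have hq1 : 1 ≤ PySem.Int.floordiv (x - 1) (A - 1) := (one_le_q A x hA).1 hx
    have hk := PySem.Int.bitLength_of_pos (show (0:Int) < PySem.Int.floordiv (x - 1) (A - 1) by omega)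
    rw [innerA, if_pos hx]
    by_cases hstop : opsNow + 1 ≥ r
    · rw [if_pos hstop, if_pos (by push_cast [hk]; omega)]
      congr 1; omega
    · rw [if_neg hstop]
      have hhalf := q_halves A x hA
      by_cases hq2 : 2 ≤ PySem.Int.floordiv (x - 1) (A - 1)
      · -- q ≥ 2: the doubled mote is still ≤ x, recurse
        have hq'1 : 1 ≤ PySem.Int.floordiv (PySem.Int.floordiv (x - 1) (A - 1)) 2 := by
          have := (PySem.Int.floordiv_eq_iff_of_pos
            (show (0:Int) < 2 by omega)).1
            (rfl : PySem.Int.floordiv (PySem.Int.floordiv (x - 1) (A - 1)) 2 = _)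
          omega
        have hmeas : (PySem.Int.floordiv (x - 1) (A + (A - 1) - 1)).toNat < n := by
          rw [hhalf]
          have := (PySem.Int.floordiv_eq_iff_of_pos
            (show (0:Int) < 2 by omega)).1
            (rfl : PySem.Int.floordiv (PySem.Int.floordiv (x - 1) (A - 1)) 2 = _)
          omega
        have hx' : A + (A - 1) ≤ x := by
          have := (one_le_q (A + (A - 1)) x (by omega)).2 (by rw [hhalf]; omega)
          omega
        rw [IH _ hmeas (A + (A - 1)) (ops + 1) (opsNow + 1) (by omega) hx' (by omega) rfl]
        rw [hhalf]
        by_cases hcond : ((PySem.Int.bitLength (PySem.Int.floordiv (PySem.Int.floordiv (x - 1) (A - 1)) 2)) : Int) ≥ r - (opsNow + 1)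
        · rw [if_pos hcond, if_pos (by rw [hk]; push_cast; omega)]
          congr 1; omega
        · rw [if_neg hcond, if_neg (by rw [hk]; push_cast at hcond ⊢; omega)]
          rw [hk, pow_succ]
          congr 1
          simp only [Prod.mk.injEq]
          exact ⟨by ring, by push_cast; ring⟩
      · -- q = 1: one grow suffices, the loop then exits with A' = 2A-1
        have hq : PySem.Int.floordiv (x - 1) (A - 1) = 1 := by omega
        have hx' : ¬ (A + (A - 1) ≤ x) := by
          rw [one_le_q (A + (A - 1)) x (by omega), hhalf, hq]
          decide
        rw [innerA, if_neg hx', hq]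
        have hk1 : PySem.Int.bitLength (1 : Int) = 1 := by decide
        rw [hk1, if_neg (by omega)]
        congr 1
        simp only [Prod.mk.injEq]
        exact ⟨by ring, by push_cast; ring⟩

theorem loop_eq (xs : List Int) : ∀ (A ops : Int), loopA A xs ops = loopB A xs ops := by
  induction xs with
  | nil => intro A ops; rfl
  | cons x rest IH =>
    intro A ops
    by_cases hx : A ≤ x
    · by_cases hA1 : A ≤ 1
      · simp only [loopA, loopB,
          innerA_of_le_one A x ops 0 (1 + (rest.length : Int)) hA1 hx (by omega),
          if_pos hx, if_pos hA1]
        omega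
      · have hA2 : (2:Int) ≤ A := by omega
        have hchar := innerA_char x (1 + (rest.length : Int))
          (PySem.Int.floordiv (x - 1) (A - 1)).toNat A ops 0 hA2 hx (by omega) rfl
        by_cases hc : ((PySem.Int.bitLength (PySem.Int.floordiv (x - 1) (A - 1))) : Int)
            ≥ 1 + (rest.length : Int)
        · rw [if_pos (by omega)] at hchar
          simp only [loopA, loopB, hchar, if_pos hx, if_neg hA1, if_pos hc]
          omega
        · rw [if_neg (by omega)] at hchar
          simp only [loopA, loopB, hchar, if_pos hx, if_neg hA1, if_neg hc]
          exact IH _ _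
    · have hno : innerA A x ops 0 (1 + (rest.length : Int)) = Sum.inr (A, ops) := by
        rw [innerA, if_neg hx]
      simp only [loopA, loopB, hno, if_neg hx]
      exact IH _ _

-- ===== VERDICT (by name: the statement is the Claim_ definition above) =====
theorem solve_spec : Claim_equal_solve := by
  intro A others _
  unfold Spec_solve solve solve_alt
  exact loop_eq _ _ _
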